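-- pv_equiv track=rewrite | github.com/bokmani/edx_MITx6001 | problem_set_4/problem2.py | getFrequencyDict
-- ===== SOURCE A (Python) =====
-- def getFrequencyDict(word):
--     hand = {}
--     for letter in word:
--         hand[letter] = hand.get(letter,0) + 1
--
--     #key 순으로 정렬을 한번 더 해준다
--     #hand의 key만 list로 추출해서 sort
--     hand_keys = list(hand.keys())
--     hand_keys.sort()
--
--     #새로운 dictionary sorted_hand에 i:hand[i]로 dictionary를 만드는데, 이때 for 순서는 정렬된 hand_keys 순서
--     #sorted_hand = {i:hand[i] for i in hand_keys}
--
--     #위의 내용을 쉬운 코드로 하면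
--     sorted_hand = {}
--     for i in hand_keys:
--         sorted_hand[i] = hand[i]
--
--
--     return sorted_hand
-- ===== SOURCE B (Python) =====
-- def getFrequencyDict(word):
--     # Sort all the letters first, then run-length encode consecutive runs in one
--     # scan: each maximal run of equal letters becomes one (letter, run_length)
--     # pair, and since the runs appear in ascending order the dict built from
--     # them is already in sorted key order.
--     def rle(letters):
--         if not letters:
--             return []
--         head = letters[0]
--         k = 1
--         while k < len(letters) and letters[k] == head:
--             k += 1
--         return [(head, k)] + rle(letters[k:])
--     return dict(rle(sorted(word)))
-- ===== Notes on version B (the rewrite author's own statement) =====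
-- stated objective: alternative
-- what changed: Instead of counting into a dict and then extracting/sorting/rebuilding by keys, B sorts the whole word once and run-length encodes the maximal runs of equal letters in a single scan, turning each run directly into a (letter, run_length) entry; no counter lookups or key-sorting phase exist.
import Mathlib
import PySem

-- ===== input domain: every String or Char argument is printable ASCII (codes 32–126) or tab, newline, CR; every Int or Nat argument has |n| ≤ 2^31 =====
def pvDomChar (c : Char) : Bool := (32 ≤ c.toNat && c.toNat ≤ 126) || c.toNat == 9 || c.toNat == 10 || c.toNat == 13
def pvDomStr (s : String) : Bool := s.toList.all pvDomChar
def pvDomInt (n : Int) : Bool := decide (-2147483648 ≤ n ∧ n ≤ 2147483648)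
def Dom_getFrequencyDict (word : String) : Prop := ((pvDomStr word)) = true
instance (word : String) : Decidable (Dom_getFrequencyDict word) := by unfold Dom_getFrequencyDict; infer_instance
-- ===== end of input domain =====

-- B sorts the word once and run-length encodes maximal runs into the dict, replacing A's count/extract-keys/sort/rebuild phases (alternative algorithm, similar cost).


-- ===== PORT A =====
-- Python's one-char strings are modelled as Char; the final .map wraps each key back into a String.
-- hand[i] in the rebuild loop is ported as getD _ 0: every i is drawn from hand.keys, so the lookup never raises.
def getFrequencyDict (word : String) : List (String × Int) :=
  let hand : PySem.Dict Char Int :=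
    word.toList.foldl (fun d letter => d.insert letter (d.getD letter 0 + 1)) PySem.Dict.empty
  let handKeys : List Char := PySem.List.sorted hand.keys (fun k => k) false
  let sortedHand : PySem.Dict Char Int :=
    handKeys.foldl (fun d i => d.insert i (hand.getD i 0)) PySem.Dict.empty
  sortedHand.items.map (fun p => (String.mk [p.1], p.2))

-- ===== PORT B =====
-- rle: the inner 'while letters[k] == head' scan is the takeWhile/dropWhile split of the tail
-- (k = 1 + length of the run continuing head); the recursive call receives letters[k:].
def pvRle : List Char → List (Char × Int)
  | [] => []
  | head :: rest =>
    (head, (1 + (rest.takeWhile (· == head)).length : Int)) ::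
      pvRle (rest.dropWhile (· == head))
termination_by l => l.length
decreasing_by
  simp only [List.length_cons]
  exact Nat.lt_succ_of_le (List.Sublist.length_le (List.dropWhile_sublist _))

-- dict(pairs) over the run list; keys of distinct runs are distinct, so items = the pair list.
def getFrequencyDict_alt (word : String) : List (String × Int) :=
  (PySem.Dict.ofList (pvRle (PySem.List.sorted word.toList (fun c => c) false))).items.map
    (fun p => (String.mk [p.1], p.2))

-- ===== PRECONDITION & SPEC =====
def Spec_getFrequencyDict (word : String) (out : List (String × Int)) : Prop := out = getFrequencyDict_alt word
instance (word : String) (out : List (String × Int)) : Decidable (Spec_getFrequencyDict word out) := by unfold Spec_getFrequencyDict; infer_instance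

-- ===== CLAIM =====
def Claim_equal_getFrequencyDict : Prop := ∀ (word : String), Dom_getFrequencyDict word → Spec_getFrequencyDict word (getFrequencyDict word)

-- ===== LEMMAS AND PROOFS =====

-- On a ≤-sorted list, the head never reappears once its leading run is dropped.
theorem pv_head_not_mem_dropWhile (h : Char) (rest : List Char)
    (hs : (h :: rest).Pairwise (· ≤ ·)) : h ∉ rest.dropWhile (· == h) := by
  intro hmem
  rcases hcase : rest.dropWhile (· == h) with _ | ⟨d, tl⟩
  · rw [hcase] at hmem; exact List.not_mem_nil hmem
  · rw [hcase] at hmem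
    have hne : rest.dropWhile (· == h) ≠ [] := by rw [hcase]; simp
    have hd := List.head_dropWhile_not (· == h) hne
    have hhead : (rest.dropWhile (· == h)).head hne = d := by simp [hcase]
    rw [hhead] at hd
    have hdne : d ≠ h := by simpa using hd
    have hsub : (d :: tl).Sublist rest := hcase ▸ List.dropWhile_sublist _
    have hpair : (d :: tl).Pairwise (· ≤ ·) := List.Pairwise.sublist hsub hs.of_cons
    have hle1 : h ≤ d := (List.pairwise_cons.mp hs).1 d (hsub.mem (List.mem_cons_self ..))
    rcases List.mem_cons.mp hmem with rfl | htl
    · exact hdne rfl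
    · exact hdne (le_antisymm ((List.pairwise_cons.mp hpair).1 h htl) hle1)

-- On a ≤-sorted list: pvRle's keys are exactly the letters, strictly increasing, and each
-- value is that letter's count in the list.
theorem pv_rle_props : ∀ l : List Char, l.Pairwise (· ≤ ·) →
    (∀ k, k ∈ (pvRle l).map Prod.fst ↔ k ∈ l) ∧
    ((pvRle l).map Prod.fst).Pairwise (· < ·) ∧
    (∀ p ∈ pvRle l, p.2 = (l.count p.1 : Int)) := by
  intro l
  induction l using pvRle.induct with
  | case1 => intro _; simp [pvRle]
  | case2 head rest ih =>
    intro hs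
    set run := rest.takeWhile (· == head) with hrdef
    set dr := rest.dropWhile (· == head) with hddef
    have hsplit : run ++ dr = rest := List.takeWhile_append_dropWhile
    have hrun : ∀ x ∈ run, head = x := by
      intro x hx
      have hb : (x == head) = true := List.mem_takeWhile_imp (p := fun y => y == head) (l := rest) (hrdef ▸ hx)
      exact (eq_of_beq hb).symm
    have hnotmem : head ∉ dr := pv_head_not_mem_dropWhile head rest hs
    have hs' : dr.Pairwise (· ≤ ·) :=
      List.Pairwise.sublist (List.dropWhile_sublist _) hs.of_cons
    obtain ⟨ihm, ihp, ihc⟩ := ih hs'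
    have hle : ∀ x ∈ rest, head ≤ x := (List.pairwise_cons.mp hs).1
    have hmemsub : ∀ {x : Char}, x ∈ dr → x ∈ rest :=
      fun hx => (List.dropWhile_sublist _).mem hx
    have hrw : pvRle (head :: rest) = (head, (1 + run.length : Int)) :: pvRle dr := by
      rw [pvRle]
    refine ⟨?_, ?_, ?_⟩
    · intro k
      rw [hrw]
      simp only [List.map_cons, List.mem_cons]
      constructor
      · rintro (rfl | hk)
        · exact Or.inl rfl
        · exact Or.inr (hmemsub ((ihm k).mp hk))
      · rintro (rfl | hk2)
        · exact Or.inl rfl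
        · rw [← hsplit] at hk2
          rcases List.mem_append.mp hk2 with hk3 | hk3
          · exact Or.inl (hrun k hk3).symm
          · exact Or.inr ((ihm k).mpr hk3)
    · rw [hrw]
      simp only [List.map_cons]
      refine List.pairwise_cons.mpr ⟨?_, ihp⟩
      intro k hk
      have hk' : k ∈ dr := (ihm k).mp hk
      exact lt_of_le_of_ne (hle k (hmemsub hk')) (fun he => hnotmem (he ▸ hk'))
    · intro p hp
      rw [hrw] at hp
      rcases List.mem_cons.mp hp with rfl | hp2
      · simp only
        have h1 : run.count head = run.length := List.count_eq_length.mpr hrun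
        have h2 : dr.count head = 0 := List.count_eq_zero.mpr hnotmem
        have hcnt : (head :: rest).count head = 1 + run.length := by
          rw [List.count_cons_self, ← hsplit, List.count_append, h1, h2]
          omega
        rw [hcnt]
        push_cast
        ring
      · have hkmem : p.1 ∈ dr :=
          (ihm p.1).mp (List.mem_map.mpr ⟨p, hp2, rfl⟩)
        have hkne : p.1 ≠ head := fun he => hnotmem (he ▸ hkmem)
        have hrun0 : run.count p.1 = 0 :=
          List.count_eq_zero.mpr (fun hx => hkne ((hrun p.1 hx).symm))
        have hcnt : (head :: rest).count p.1 = dr.count p.1 := by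
          rw [List.count_cons_of_ne hkne.symm, ← hsplit, List.count_append, hrun0]
          omega
        rw [hcnt]
        exact ihc p hp2

-- ===== VERDICT =====
theorem getFrequencyDict_spec : Claim_equal_getFrequencyDict := by
  intro word _
  unfold Spec_getFrequencyDict getFrequencyDict getFrequencyDict_alt
  have hs : (PySem.List.sorted word.toList (fun c => c) false).Pairwise (· ≤ ·) := by
    simpa using PySem.List.sorted_pairwise word.toList (fun c => c)
  obtain ⟨hm, hp, hc⟩ := pv_rle_props _ hs
  have hperm : (PySem.List.sorted word.toList (fun c => c) false).Perm word.toList :=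
    PySem.List.sorted_perm _ _ _
  have hndB : ((pvRle (PySem.List.sorted word.toList (fun c => c) false)).map Prod.fst).Nodup :=
    hp.imp (fun h => ne_of_lt h)
  -- the sorted distinct letters are exactly pvRle's key list
  have hkeys : PySem.List.sorted (PySem.Set.ofList word.toList) (fun k => k) false =
      (pvRle (PySem.List.sorted word.toList (fun c => c) false)).map Prod.fst := by
    refine PySem.List.sorted_eq_of_perm_of_pairwise_lt _ _ _ ?_ (by simpa using hp)
    refine (List.perm_ext_iff_of_nodup hndB (PySem.Set.nodup_ofList _)).mpr ?_
    intro k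
    rw [hm k, PySem.Set.mem_ofList, hperm.mem_iff]
  have hndK : (PySem.List.sorted (PySem.Set.ofList word.toList) (fun k => k) false).Nodup :=
    (PySem.List.sorted_perm _ _ _).nodup_iff.mpr (PySem.Set.nodup_ofList _)
  -- A side: counter + rebuild over sorted fresh keys
  simp only [PySem.Dict.foldl_insert_getD_add_one_eq_counter, PySem.Dict.keys_counter]
  rw [PySem.Dict.items_foldl_insert_fresh _ _ _ _
        (fun a _ => PySem.Dict.contains_empty _) (by simpa using hndK)]
  -- B side: dict() of the run list with distinct keys is the run list itself
  have hB : (PySem.Dict.ofList (pvRle (PySem.List.sorted word.toList (fun c => c) false))).items =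
      pvRle (PySem.List.sorted word.toList (fun c => c) false) := by
    unfold PySem.Dict.ofList PySem.Dict.update
    rw [PySem.Dict.items_foldl_insert_fresh _ Prod.fst Prod.snd _
          (fun a _ => PySem.Dict.contains_empty _) hndB]
    simp [PySem.Dict.empty]
  have hemp : (PySem.Dict.empty : PySem.Dict Char Int).items = [] := rfl
  rw [hB, hkeys, hemp, List.nil_append]
  refine congrArg (List.map _) ?_
  rw [List.map_map]
  conv_rhs => rw [← List.map_id (pvRle (PySem.List.sorted word.toList (fun c => c) false))]
  refine List.map_congr_left ?_
  intro p hp2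
  have hval : p.2 = ((PySem.List.sorted word.toList (fun c => c) false).count p.1 : Int) := hc p hp2
  rw [hperm.count_eq] at hval
  simp only [Function.comp, id_eq]
  rw [PySem.Dict.getD_counter, ← hval]
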